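-- pv_equiv track=rewrite | github.com/egaldamez/Author-Classification | scripts/Parser.py | map_author_value
-- ===== SOURCE A (Python) =====
-- def _extract_target_value(filename):
--     '''
--         From a filename such as author-book_title.txt, we will extract the author as a target value.
--     '''
--     return filename.split('-')[0]
--
-- def map_author_value(corpus):
--     '''
--         This function will assign an integer number to an author.
--     '''
--
--     author_map = {}
--     author_id = 0
--     for doc in corpus:
--         author = _extract_target_value(doc)
--         if author not in author_map:
--             author_map[author] = author_id
--             author_id += 1
--
--     return author_map
-- ===== SOURCE B (Python) =====
-- def _extract_target_value(filename):
--     return filename.split('-')[0]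
--
--
-- def map_author_value(corpus):
--     # Reverse sweep with last-write-wins: after it, first[a] holds the FIRST
--     # occurrence index of author a in corpus.
--     first = {}
--     for i in range(len(corpus) - 1, -1, -1):
--         first[_extract_target_value(corpus[i])] = i
--     # Sort the distinct authors by first-occurrence index and rank them.
--     return {a: rank for rank, a in enumerate(sorted(first, key=first.get))}
-- ===== Notes on version B (the rewrite author's own statement) =====
-- stated objective: alternative
-- what changed: Replaces A's forward streaming pass (membership test + manual counter) by a different algorithm: a reverse last-write-wins sweep that records each author's first-occurrence index, followed by sorting the distinct authors by that index and ranking them with enumerate.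
import Mathlib
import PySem

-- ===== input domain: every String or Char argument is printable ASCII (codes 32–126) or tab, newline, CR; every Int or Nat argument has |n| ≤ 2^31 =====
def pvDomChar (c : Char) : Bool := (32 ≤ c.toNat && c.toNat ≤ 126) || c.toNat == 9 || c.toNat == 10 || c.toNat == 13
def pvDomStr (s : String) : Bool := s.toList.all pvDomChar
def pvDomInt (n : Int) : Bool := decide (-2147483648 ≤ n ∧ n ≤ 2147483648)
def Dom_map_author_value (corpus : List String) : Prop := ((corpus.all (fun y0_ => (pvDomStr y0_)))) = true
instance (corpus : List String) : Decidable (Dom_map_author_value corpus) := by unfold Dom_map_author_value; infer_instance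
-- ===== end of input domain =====

-- B replaces A's forward streaming pass (membership test + manual counter) by a reverse
-- last-write-wins sweep recording first-occurrence indices, then sorting the distinct
-- authors by that index and ranking them (alternative algorithm, not claimed faster).


-- ===== PORT A =====
-- _extract_target_value: filename.split('-')[0]; split? with the nonempty sep "-" is
-- always `some` of a nonempty list, so getD/headD defaults are never taken (exact).
def pvExtract (filename : String) : String :=
  ((PySem.Str.split? filename "-").getD []).headD ""

def map_author_value (corpus : List String) : List (String × Int) :=
  (corpus.foldl
    (fun (st : PySem.Dict String Int × Int) doc =>
      let author := pvExtract doc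
      if st.1.contains author then st
      else (st.1.insert author st.2, st.2 + 1))
    (PySem.Dict.empty, 0)).1.items

-- ===== PORT B =====
def pvExtractB (filename : String) : String :=
  ((PySem.Str.split? filename "-").getD []).headD ""

def map_author_value_alt (corpus : List String) : List (String × Int) :=
  -- reverse sweep: for i in range(len(corpus)-1, -1, -1): first[extract(corpus[i])] = i
  let first : PySem.Dict String Int :=
    (PySem.List.pyRange ((corpus.length : Int) - 1) (-1) (-1)).foldl
      (fun d i => d.insert (pvExtractB (PySem.List.pyGetD corpus i "")) i) PySem.Dict.empty
  -- sorted(first, key=first.get), then {a: rank for rank, a in enumerate(...)}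
  let order := PySem.List.sorted first.keys (fun a => first.getD a 0) false
  (PySem.List.enumerate order 0).map (fun p => (p.2, p.1))

-- ===== PRECONDITION & SPEC =====
def Spec_map_author_value (corpus : List String) (out : List (String × Int)) : Prop := out = map_author_value_alt corpus
instance (corpus : List String) (out : List (String × Int)) : Decidable (Spec_map_author_value corpus out) := by unfold Spec_map_author_value; infer_instance

-- ===== CLAIM =====
def Claim_equal_map_author_value : Prop := ∀ (corpus : List String), Dom_map_author_value corpus → Spec_map_author_value corpus (map_author_value corpus)

-- ===== LEMMAS AND PROOFS =====

-- A's loop body, over the already-extracted author list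
def pvStep (st : PySem.Dict String Int × Int) (x : String) : PySem.Dict String Int × Int :=
  if st.1.contains x then st else (st.1.insert x st.2, st.2 + 1)

lemma pvLoop_invariant (xs : List String) :
    (xs.foldl pvStep (PySem.Dict.empty, 0)).1.items
      = (PySem.List.enumerate (PySem.Set.ofList xs) 0).map (fun p => (p.2, p.1))
    ∧ (xs.foldl pvStep (PySem.Dict.empty, 0)).2
      = ((PySem.Set.ofList xs).length : Int) := by
  induction xs using List.reverseRecOn with
  | nil => constructor <;> rfl
  | append_singleton xs x ih =>
    obtain ⟨hItems, hCnt⟩ := ih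
    rw [List.foldl_append]
    set st := xs.foldl pvStep (PySem.Dict.empty, 0) with hst
    have hkeys : st.1.keys = PySem.Set.ofList xs := by
      show st.1.items.map (·.1) = _
      rw [hItems, List.map_map]
      exact PySem.List.map_snd_enumerate ..
    rw [PySem.Set.ofList_append_singleton]
    by_cases hmem : x ∈ (PySem.Set.ofList xs : List String)
    · have hc : st.1.contains x = true := by
        rw [PySem.Dict.contains_iff_mem_keys, hkeys]; exact hmem
      simp [List.foldl, pvStep, hc, PySem.Set.add_of_mem hmem, hItems, hCnt]
    · have hc : st.1.contains x = false := by
        rw [Bool.eq_false_iff, Ne, PySem.Dict.contains_iff_mem_keys, hkeys]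
        exact hmem
      simp only [List.foldl, pvStep, hc, Bool.false_eq_true, if_false]
      rw [PySem.Set.add_of_not_mem hmem]
      constructor
      · have := PySem.Dict.items_insert_of_not_contains (d := st.1) (k := x) (v := st.2) hc
        rw [this, hItems, hCnt, PySem.List.enumerate_append, List.map_append]
        simp [PySem.List.enumerate]
      · simp [hCnt]

-- B's reverse sweep, rewritten as a foldr over ascending index/author pairs:
-- first-match semantics for get?, through the head insert.
lemma pvFoldrInsert_get? (l : List (Int × String)) (d : PySem.Dict String Int) (k : String) :
    (l.foldr (fun p d => d.insert p.2 p.1) d).get? k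
      = match l.find? (fun p => p.2 == k) with
        | some p => some p.1
        | none => d.get? k := by
  induction l with
  | nil => rfl
  | cons p t ih =>
    by_cases h : p.2 = k
    · subst h; simp [PySem.Dict.get?_insert_self]
    · have hbk : (p.2 == k) = false := by simpa using h
      rw [List.foldr_cons, PySem.Dict.get?_insert_of_ne _ _ (Ne.symm h), ih, List.find?_cons]
      simp [hbk]

lemma pvFoldrInsert_mem_keys (l : List (Int × String)) (d : PySem.Dict String Int) (k : String) :
    k ∈ (l.foldr (fun p d => d.insert p.2 p.1) d).keys ↔ k ∈ l.map (·.2) ∨ k ∈ d.keys := by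
  induction l with
  | nil => simp
  | cons p t ih => simp [PySem.Dict.mem_keys_insert, ih]; tauto

lemma pvFoldrInsert_nodup_keys (l : List (Int × String)) (d : PySem.Dict String Int)
    (h : d.keys.Nodup) : (l.foldr (fun p d => d.insert p.2 p.1) d).keys.Nodup := by
  induction l with
  | nil => exact h
  | cons p t ih => exact PySem.Dict.nodup_keys_insert _ _ _ ih

-- pointwise congruence for foldr over a list's members
lemma pvFoldr_congr_mem {α β : Type} {l : List α} {f g : α → β → β} {b : β}
    (h : ∀ a ∈ l, ∀ y, f a y = g a y) : l.foldr f b = l.foldr g b := by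
  induction l with
  | nil => rfl
  | cons x t ih =>
    rw [List.foldr_cons, List.foldr_cons, ih (fun a ha y => h a (List.mem_cons_of_mem _ ha) y),
      h x (List.mem_cons_self ..)]

-- find? of the "author at index" predicate over enumerate = first-occurrence index
lemma pvFind_enumerate (xs : List String) (s : Int) (a : String) :
    (PySem.List.enumerate xs s).find? (fun p => p.2 == a)
      = if a ∈ xs then some ((s + (xs.idxOf a : Int)), a) else none := by
  induction xs generalizing s with
  | nil => simp
  | cons x t ih =>
    rw [PySem.List.enumerate_cons, List.find?_cons]
    by_cases h : x = a
    · subst h; simp [List.idxOf_cons_self]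
    · have hba : (x == a) = false := by simp [h]
      simp only [hba, ih (s + 1)]
      by_cases hm : a ∈ t
      · have : a ∈ x :: t := List.mem_cons_of_mem _ hm
        simp [hm, this, List.idxOf_cons_ne _ (by simpa using h)]
        ring
      · have : a ∉ x :: t := by simp [Ne.symm h, hm]
        simp [hm, this]

-- first-appearance order: PySem.Set.ofList is strictly increasing in idxOf
lemma pvOfList_pairwise_idxOf (xs : List String) :
    (PySem.Set.ofList xs : List String).Pairwise (fun a b => xs.idxOf a < xs.idxOf b) := by
  induction xs using List.reverseRecOn with
  | nil => simp
  | append_singleton xs x ih =>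
    rw [PySem.Set.ofList_append_singleton]
    have hidx : ∀ a ∈ (PySem.Set.ofList xs : List String),
        (xs ++ [x]).idxOf a = xs.idxOf a := by
      intro a ha
      exact List.idxOf_append_of_mem (by simpa using (PySem.Set.mem_ofList ..).mp ha)
    by_cases hmem : x ∈ (PySem.Set.ofList xs : List String)
    · rw [PySem.Set.add_of_mem hmem]
      exact ih.imp_of_mem (fun {a b} ha hb h => by rw [hidx a ha, hidx b hb]; exact h)
    · rw [PySem.Set.add_of_not_mem hmem]
      have hxm : x ∉ xs := fun h => hmem ((PySem.Set.mem_ofList ..).mpr h)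
      refine List.pairwise_append.mpr ⟨ih.imp_of_mem (fun {a b} ha hb h => by
          rw [hidx a ha, hidx b hb]; exact h), (by simp), ?_⟩
      intro a ha b hb
      rw [List.mem_singleton] at hb; subst hb
      rw [hidx a ha, List.idxOf_append_of_notMem hxm, List.idxOf_cons_self]
      have : xs.idxOf a < xs.length :=
        List.idxOf_lt_length_of_mem (by simpa using (PySem.Set.mem_ofList ..).mp ha)
      omega

theorem map_author_value_eq (corpus : List String) :
    map_author_value corpus = map_author_value_alt corpus := by
  -- A's side: reduce to the extracted-author list
  have hA : map_author_value corpus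
      = (PySem.List.enumerate (PySem.Set.ofList (corpus.map pvExtract)) 0).map
          (fun p => (p.2, p.1)) := by
    unfold map_author_value
    have h : corpus.foldl
        (fun (st : PySem.Dict String Int × Int) doc =>
          let author := pvExtract doc
          if st.1.contains author then st
          else (st.1.insert author st.2, st.2 + 1))
        (PySem.Dict.empty, 0)
        = (corpus.map pvExtract).foldl pvStep (PySem.Dict.empty, 0) := by
      rw [List.foldl_map]; rfl
    rw [h, (pvLoop_invariant (corpus.map pvExtract)).1]
  -- B's side
  set xs := corpus.map pvExtract with hxs
  simp only [map_author_value_alt]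
  -- rewrite the countdown fold as a foldr over enumerate corpus
  have hrange : PySem.List.pyRange ((corpus.length : Int) - 1) (-1) (-1)
      = (PySem.List.pyRange 0 (corpus.length : Int) 1).reverse := by
    rw [PySem.List.pyRange_neg_one_eq_reverse]
    norm_num
  have hmapIdx : PySem.List.pyRange 0 (corpus.length : Int) 1
      = (PySem.List.enumerate corpus 0).map (·.1) := by
    rw [PySem.List.map_fst_enumerate]; norm_num
  have hfold :
      (PySem.List.pyRange ((corpus.length : Int) - 1) (-1) (-1)).foldl
        (fun d i => d.insert (pvExtractB (PySem.List.pyGetD corpus i "")) i) PySem.Dict.empty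
      = ((PySem.List.enumerate corpus 0).map (fun p => (p.1, pvExtract p.2))).foldr
          (fun p d => d.insert p.2 p.1) PySem.Dict.empty := by
    rw [hrange, List.foldl_reverse, hmapIdx, List.foldr_map, List.foldr_map]
    apply pvFoldr_congr_mem
    intro p hp d
    obtain ⟨k, hk, rfl⟩ := (PySem.List.mem_enumerate_iff ..).mp hp
    simp [pvExtractB, pvExtract, List.getElem?_eq_getElem hk]
  set l := (PySem.List.enumerate corpus 0).map (fun p => (p.1, pvExtract p.2)) with hl
  set first := l.foldr (fun p d => d.insert p.2 p.1) PySem.Dict.empty with hfirst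
  rw [hfold]
  -- find? over l is the first-occurrence index in xs
  have hsnd : l.map (·.2) = xs := by
    rw [hl, hxs, List.map_map]
    show (PySem.List.enumerate corpus 0).map (fun p => pvExtract p.2) = corpus.map pvExtract
    have : (PySem.List.enumerate corpus 0).map (fun p => pvExtract p.2)
        = ((PySem.List.enumerate corpus 0).map (·.2)).map pvExtract := by
      rw [List.map_map]; rfl
    rw [this, PySem.List.map_snd_enumerate]
  have hfind : ∀ a, l.find? (fun p => p.2 == a)
      = if a ∈ xs then some ((xs.idxOf a : Int), a) else none := by
    intro a
    have : l = PySem.List.enumerate xs 0 := by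
      rw [hl, hxs, PySem.List.enumerate_eq_zipIdx_map, PySem.List.enumerate_eq_zipIdx_map]
      rw [List.zipIdx_map]
      simp [List.map_map, Function.comp_def]
    rw [this, pvFind_enumerate]
    simp
  have hget : ∀ a ∈ xs, first.get? a = some (xs.idxOf a : Int) := by
    intro a ha
    rw [hfirst, pvFoldrInsert_get? l PySem.Dict.empty a, hfind a, if_pos ha]
  -- keys of first: same elements as Set.ofList xs, and Nodup
  have hkeysmem : ∀ a, a ∈ first.keys ↔ a ∈ (PySem.Set.ofList xs : List String) := by
    intro a
    rw [hfirst, pvFoldrInsert_mem_keys, hsnd, PySem.Set.mem_ofList]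
    simp [PySem.Dict.keys_empty]
  have hnodup : first.keys.Nodup :=
    pvFoldrInsert_nodup_keys l PySem.Dict.empty (by simp [PySem.Dict.keys_empty])
  have hperm : (PySem.Set.ofList xs : List String).Perm first.keys :=
    (List.perm_ext_iff_of_nodup (PySem.Set.nodup_ofList xs) hnodup).mpr
      (fun a => (hkeysmem a).symm)
  -- the sort returns exactly the first-appearance order
  have hsorted : PySem.List.sorted first.keys (fun a => first.getD a 0) false
      = (PySem.Set.ofList xs : List String) := by
    refine PySem.List.sorted_eq_of_perm_of_pairwise_lt _ _ _ hperm ?_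
    refine (pvOfList_pairwise_idxOf xs).imp_of_mem ?_
    intro a b ha hb h
    have hga := hget a ((PySem.Set.mem_ofList ..).mp ha)
    have hgb := hget b ((PySem.Set.mem_ofList ..).mp hb)
    rw [PySem.Dict.getD_eq_get?_getD, PySem.Dict.getD_eq_get?_getD, hga, hgb]
    simpa using h
  rw [hsorted, hA]

-- ===== VERDICT =====
theorem map_author_value_spec : Claim_equal_map_author_value := by
  intro corpus _
  exact map_author_value_eq corpus
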